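-- pv_equiv track=rewrite | github.com/FlaSpaceInst/EZ-RASSOR | packages/extras/qt_gui/scripts/resource_tracker.py | parse_pids
-- ===== SOURCE A (Python) =====
-- def parse_pids(pid_string):
--
--     # Initialize the array and helper variables
--     pid_array=[]
--     place_in_array=0
--     single_parsed_pid = ''
--     input_length = len(pid_string)
--
--     # Begin the loop through the entire pid_string
--     for i in range(input_length) :
--
--         # Check to see if the current value of the pid_string is an integer. If it isnt then it is a space between PIDs and should start a new PID
--         int_check = pid_string[i].isdigit()
--
--         # If it is the last value of pid_string then this if statement will be called and will add the PID to the array in its current state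
--         if (i == input_length-1) :
--             if (int_check == True):
--
--                 # Add the current value to PID currently being formed
--                 single_parsed_pid = single_parsed_pid + pid_string[i]
--
--                 # Add the PID currently being formed to the array
--                 pid_array.insert(place_in_array, single_parsed_pid)
--                 place_in_array += 1
--                 single_parsed_pid = ''
--
--             else :
--
--                 pid_array.insert(place_in_array, single_parsed_pid)
--                 place_in_array += 1
--                 single_parsed_pid = ''
--
--         # If it is not the last value then the PID will only be added to the array when a line break is found
--         else:
--
--             if (int_check == True):
--
--                 # Add the current value to PID currently being formed
--                 single_parsed_pid = single_parsed_pid + pid_string[i]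
--
--             else :
--
--                 # Add the PID currently being formed to the array
--                 pid_array.insert(place_in_array, single_parsed_pid)
--                 # Increment the array place counter
--                 place_in_array += 1
--                 # Reset the
--                 single_parsed_pid = ''
--
--     # Return the usable PIDs
--     return pid_array
-- ===== SOURCE B (Python) =====
-- def parse_pids(pid_string):
--     tokens = ''.join(c if c.isdigit() else '\n' for c in pid_string).split('\n')
--     if not pid_string or not pid_string[-1].isdigit():
--         tokens = tokens[:-1]
--     return tokens
-- ===== Notes on version B (the rewrite author's own statement) =====
-- stated objective: simpler
-- what changed: A's index loop with an explicit accumulator, position counter and special-cased last iteration is replaced by mapping every non-digit character to a newline sentinel, one standard str.split on that sentinel, and dropping the single trailing empty token when the string is empty or ends in a non-digit.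
import Mathlib
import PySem

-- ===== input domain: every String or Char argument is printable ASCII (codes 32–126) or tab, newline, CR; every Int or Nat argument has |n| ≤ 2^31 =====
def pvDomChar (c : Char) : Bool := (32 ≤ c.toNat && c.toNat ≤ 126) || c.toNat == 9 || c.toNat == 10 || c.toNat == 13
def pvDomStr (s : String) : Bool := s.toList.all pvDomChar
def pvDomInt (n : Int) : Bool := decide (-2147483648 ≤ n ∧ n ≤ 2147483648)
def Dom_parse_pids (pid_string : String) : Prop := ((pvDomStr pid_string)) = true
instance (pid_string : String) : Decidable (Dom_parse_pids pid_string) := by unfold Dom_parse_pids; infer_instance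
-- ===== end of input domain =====

-- B replaces A's index loop with accumulator by a character-map to a sentinel-delimited
-- string, one str.split, and a single trailing-token drop — simpler decomposition, same values.

-- ===== PORT A =====
-- the body of A's `for i in range(input_length)` loop, on state (pid_array, place_in_array, single_parsed_pid)
def pvStepA (cs : List Char) (st : List (List Char) × Int × List Char) (i : Int) :
    List (List Char) × Int × List Char :=
  let pid_array := st.1
  let place_in_array := st.2.1
  let single_parsed_pid := st.2.2
  let int_check := PySem.Chars.isdigit (PySem.List.pyGetD cs i ' ')
  if i = (cs.length : Int) - 1 then
    if int_check then
      (PySem.List.insert pid_array place_in_array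
        (single_parsed_pid ++ [PySem.List.pyGetD cs i ' ']), place_in_array + 1, [])
    else
      (PySem.List.insert pid_array place_in_array single_parsed_pid, place_in_array + 1, [])
  else
    if int_check then
      (pid_array, place_in_array, single_parsed_pid ++ [PySem.List.pyGetD cs i ' '])
    else
      (PySem.List.insert pid_array place_in_array single_parsed_pid, place_in_array + 1, [])

def parse_pids (pid_string : String) : List String :=
  let cs := pid_string.toList
  let input_length := cs.length
  let st := (PySem.List.pyRange 0 (input_length : Int) 1).foldl (pvStepA cs)
    (([] : List (List Char)), (0 : Int), ([] : List Char))
  st.1.map String.ofList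

-- ===== PORT B =====
def parse_pids_alt (pid_string : String) : List String :=
  let cs := pid_string.toList
  let transformed := cs.map (fun c => if PySem.Chars.isdigit c then c else '\n')
  let tokens := PySem.Chars.splitOn transformed ['\n']
  let keep : Bool :=
    match PySem.List.pyGet? cs (-1) with
    | none => false                        -- `not pid_string` (empty string)
    | some c => PySem.Chars.isdigit c      -- `pid_string[-1].isdigit()`
  (cond keep tokens (PySem.List.slice tokens none (some (-1)))).map String.ofList

-- ===== PRECONDITION & SPEC =====
def Spec_parse_pids (pid_string : String) (out : List String) : Prop := out = parse_pids_alt pid_string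
instance (pid_string : String) (out : List String) : Decidable (Spec_parse_pids pid_string out) := by unfold Spec_parse_pids; infer_instance

-- ===== CLAIM (what is proved, stated in full; the proofs are below) =====
def Claim_equal_parse_pids : Prop := ∀ (pid_string : String), Dom_parse_pids pid_string → Spec_parse_pids pid_string (parse_pids pid_string)

-- ===== LEMMAS AND PROOFS =====

-- common token spec: split cs on non-digits, keeping empties, with a trailing empty token
def pvTok : List Char → List Char → List (List Char)
  | [], cur => [cur]
  | c :: rest, cur =>
    if PySem.Chars.isdigit c then pvTok rest (cur ++ [c]) else cur :: pvTok rest []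

-- recursion equivalent to A's fold (place_in_array is always the array length)
def pvGA : List Char → List (List Char) → List Char → List (List Char) × Int × List Char
  | [], arr, cur => (arr, (arr.length : Int), cur)
  | c :: rest, arr, cur =>
    if rest.isEmpty then
      if PySem.Chars.isdigit c then
        ((arr ++ [cur ++ [c]]), ((arr ++ [cur ++ [c]]).length : Int), [])
      else ((arr ++ [cur]), ((arr ++ [cur]).length : Int), [])
    else
      if PySem.Chars.isdigit c then pvGA rest arr (cur ++ [c])
      else pvGA rest (arr ++ [cur]) []

-- recursion equivalent to B's split on '\n'
def pvSplitNl : List Char → List Char → List (List Char)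
  | [], cur => [cur]
  | c :: rest, cur =>
    if c = '\n' then cur :: pvSplitNl rest [] else pvSplitNl rest (cur ++ [c])

lemma pv_insert_append {α : Type} (xs : List α) (v : α) :
    PySem.List.insert xs (xs.length : Int) v = xs ++ [v] := by
  simp [PySem.List.insert, PySem.List.sliceIndices]
  rw [if_neg (by omega : ¬ ((xs.length : Int) < 0))]
  simp

lemma pv_foldA (cs : List Char) (j : Nat) (hj : j ≤ cs.length)
    (arr : List (List Char)) (cur : List Char) :
    (PySem.List.pyRange (j : Int) (cs.length : Int) 1).foldl (pvStepA cs)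
      (arr, (arr.length : Int), cur) = pvGA (cs.drop j) arr cur := by
  induction h : cs.length - j generalizing j arr cur with
  | zero =>
      have hje : j = cs.length := by omega
      subst hje
      simp [List.drop_length, pvGA]
  | succ k ih =>
      have hjlt : j < cs.length := by omega
      rw [PySem.List.pyRange_one_cons (by exact_mod_cast hjlt), List.foldl_cons]
      rw [List.drop_eq_getElem_cons hjlt]
      have hget : PySem.List.pyGetD cs (j : Int) ' ' = cs[j] := by
        rw [PySem.List.pyGetD_natCast, List.getD_eq_getElem cs ' ' hjlt]
      simp only [pvStepA, hget]
      by_cases hl : j + 1 = cs.length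
      · have hiq : ((j : Int) = (cs.length : Int) - 1) := by omega
        have hempty : cs.drop (j + 1) = [] := by rw [hl]; exact List.drop_length
        rw [if_pos hiq]
        have hrange : PySem.List.pyRange ((j : Int) + 1) (cs.length : Int) = [] := by
          rw [PySem.List.pyRange_one]
          have : ((cs.length : Int) - ((j : Int) + 1)).toNat = 0 := by omega
          simp [this]
        by_cases hd : PySem.Chars.isdigit cs[j] = true
        · rw [if_pos hd]
          simp [hrange, pvGA, hempty, pv_insert_append, hd]
        · rw [if_neg hd]
          simp [hrange, pvGA, hempty, pv_insert_append, hd]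
      · have hiq : ¬ ((j : Int) = (cs.length : Int) - 1) := by omega
        rw [if_neg hiq]
        have hne : (cs.drop (j + 1)).isEmpty = false := by
          simp [List.drop_eq_nil_iff]
          omega
        have hcast : ((j : Int) + 1) = ((j + 1 : Nat) : Int) := by push_cast; ring
        by_cases hd : PySem.Chars.isdigit cs[j] = true
        · rw [if_pos hd]
          rw [show pvGA (cs[j] :: cs.drop (j + 1)) arr cur
                = pvGA (cs.drop (j + 1)) arr (cur ++ [cs[j]]) by simp [pvGA, hne, hd]]
          rw [hcast]
          exact ih (j + 1) (by omega) arr (cur ++ [cs[j]]) (by omega)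
        · rw [if_neg hd]
          rw [show pvGA (cs[j] :: cs.drop (j + 1)) arr cur
                = pvGA (cs.drop (j + 1)) (arr ++ [cur]) [] by simp [pvGA, hne, hd]]
          rw [pv_insert_append,
            show ((arr.length : Int) + 1) = (((arr ++ [cur]).length : Nat) : Int) by simp,
            hcast]
          exact ih (j + 1) (by omega) (arr ++ [cur]) [] (by omega)

lemma pvTok_ne_nil (l cur : List Char) : pvTok l cur ≠ [] := by
  induction l generalizing cur with
  | nil => simp [pvTok]
  | cons c rest ih =>
      by_cases hd : PySem.Chars.isdigit c = true
      · simpa [pvTok, hd] using ih (cur ++ [c])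
      · simp [pvTok, hd]

lemma pvGA_fst (l : List Char) (hne : l ≠ []) (arr : List (List Char)) (cur : List Char) :
    (pvGA l arr cur).1 = arr ++ (if PySem.Chars.isdigit (l.getLast hne) then pvTok l cur
      else (pvTok l cur).dropLast) := by
  induction l generalizing arr cur with
  | nil => exact absurd rfl hne
  | cons c rest ih =>
      cases rest with
      | nil =>
          by_cases hd : PySem.Chars.isdigit c = true
          · simp [pvGA, pvTok, hd]
          · simp [pvGA, pvTok, hd]
      | cons d t =>
          have hrest : (d :: t) ≠ ([] : List Char) := by simp
          have hlast : (c :: d :: t).getLast hne = (d :: t).getLast hrest :=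
            List.getLast_cons hrest
          by_cases hd : PySem.Chars.isdigit c = true
          · rw [show pvGA (c :: d :: t) arr cur = pvGA (d :: t) arr (cur ++ [c]) by
              simp [pvGA, hd]]
            rw [ih hrest arr (cur ++ [c]), hlast]
            simp [pvTok, hd]
          · rw [show pvGA (c :: d :: t) arr cur = pvGA (d :: t) (arr ++ [cur]) [] by
              simp [pvGA, hd]]
            rw [ih hrest (arr ++ [cur]) [], hlast]
            by_cases hdl : PySem.Chars.isdigit ((d :: t).getLast hrest) = true
            · simp [pvTok, hd, hdl]
            · simp only [if_neg hdl,
                show pvTok (c :: d :: t) cur = cur :: pvTok (d :: t) [] from by simp [pvTok, hd],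
                List.dropLast_cons_of_ne_nil (pvTok_ne_nil _ _)]
              simp

lemma pv_go_eq (fuel : Nat) (l cur : List Char) (acc : List (List Char)) (h : l.length ≤ fuel) :
    PySem.Chars.splitOn.go ['\n'] fuel l cur acc = acc.reverse ++ pvSplitNl l cur.reverse := by
  induction fuel generalizing l cur acc with
  | zero =>
      have : l = [] := by
        cases l with
        | nil => rfl
        | cons c rest => simp at h
      subst this
      simp [PySem.Chars.splitOn.go, pvSplitNl]
  | succ fuel ih =>
      cases l with
      | nil => simp [PySem.Chars.splitOn.go, pvSplitNl]
      | cons c rest =>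
          simp only [PySem.Chars.splitOn.go]
          by_cases hc : c = '\n'
          · subst hc
            rw [if_pos (by simp [List.isPrefixOf])]
            rw [ih _ [] _ (by simpa using Nat.le_of_succ_le_succ (by simpa using h))]
            simp [pvSplitNl]
          · rw [if_neg (by simp [List.isPrefixOf]; exact fun e => hc e.symm)]
            rw [ih rest (c :: cur) acc (by simpa using Nat.le_of_succ_le_succ (by simpa using h))]
            simp [pvSplitNl, hc]

lemma pv_splitOn_eq (l : List Char) : PySem.Chars.splitOn l ['\n'] = pvSplitNl l [] := by
  rw [show PySem.Chars.splitOn l ['\n'] = PySem.Chars.splitOn.go ['\n'] (l.length + 1) l [] [] from rfl]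
  simpa using pv_go_eq (l.length + 1) l [] [] (by omega)

lemma pv_map_tok (cs cur : List Char) :
    pvSplitNl (cs.map (fun c => if PySem.Chars.isdigit c then c else '\n')) cur = pvTok cs cur := by
  induction cs generalizing cur with
  | nil => simp [pvSplitNl, pvTok]
  | cons c rest ih =>
      by_cases hd : PySem.Chars.isdigit c = true
      · have hcne : c ≠ '\n' := by
          intro e; subst e; simp [PySem.Chars.isdigit] at hd
        simp [pvSplitNl, pvTok, hd, hcne, ih]
      · simp [pvSplitNl, pvTok, hd, ih]

lemma pv_pyGet_neg_one {α : Type} (l : List α) (h : l ≠ []) :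
    PySem.List.pyGet? l (-1) = some (l.getLast h) := by
  have hlen : 0 < l.length := List.length_pos_of_ne_nil h
  simp [PySem.List.pyGet?, PySem.List.pyIdx?]
  rw [if_pos (by omega : 1 ≤ l.length)]
  simp [List.getLast_eq_getElem, List.getElem?_eq_getElem (by omega : l.length - 1 < l.length)]

-- ===== VERDICT (by name: the statement is the Claim_ definition above) =====
theorem parse_pids_spec : Claim_equal_parse_pids := by
  intro s _
  unfold Spec_parse_pids parse_pids parse_pids_alt
  by_cases hne : s.toList = []
  · simp [hne, pv_splitOn_eq, pvSplitNl, PySem.List.pyGet?, PySem.List.slice_to_neg_one]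
  · have hfold := pv_foldA s.toList 0 (by omega) [] []
    simp only [List.drop_zero, List.length_nil, Nat.cast_zero] at hfold
    simp only [hfold]
    rw [pvGA_fst s.toList hne [] []]
    rw [pv_splitOn_eq, pv_map_tok]
    rw [pv_pyGet_neg_one s.toList hne]
    by_cases hd : PySem.Chars.isdigit (s.toList.getLast hne) = true
    · simp [hd]
    · simp [hd, PySem.List.slice_to_neg_one]
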